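-- pv_equiv track=rewrite | github.com/AtlasArcadia/SIA_DSO_II | AisRobotBuffet/Library/General/atlasConvertHtmlToXlsx/ConvertHtmlToXlsx.py | get_string_in_double_quote
-- ===== SOURCE A (Python) =====
-- def get_string_in_double_quote(text):
--     lists = []
--     double_quote = False
--     var = ""
--     for arr in text:
--         if arr == '"':
--             double_quote = not double_quote
--
--         if double_quote:
--             var += arr
--         else:
--             if len(var) != 0:
--                 lists.append(var[1:])
--                 var = ""
--     return lists
-- ===== SOURCE B (Python) =====
-- def get_string_in_double_quote(text):
--     # quoted contents are the parts at odd positions of the split; a part with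
--     # no following part comes after an unterminated quote and is dropped
--     parts = iter(text.split('"')[1:])
--     out = []
--     for content in parts:
--         if next(parts, None) is None:
--             break
--         out.append(content)
--     return out
-- ===== Notes on version B (the rewrite author's own statement) =====
-- stated objective: faster
-- what changed: A scans character by character with a quote-toggle flag and incremental string building; B splits the text at the double-quote character once and keeps every other part (each part that is followed by another), dropping an unterminated trailing part.
import Mathlib
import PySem

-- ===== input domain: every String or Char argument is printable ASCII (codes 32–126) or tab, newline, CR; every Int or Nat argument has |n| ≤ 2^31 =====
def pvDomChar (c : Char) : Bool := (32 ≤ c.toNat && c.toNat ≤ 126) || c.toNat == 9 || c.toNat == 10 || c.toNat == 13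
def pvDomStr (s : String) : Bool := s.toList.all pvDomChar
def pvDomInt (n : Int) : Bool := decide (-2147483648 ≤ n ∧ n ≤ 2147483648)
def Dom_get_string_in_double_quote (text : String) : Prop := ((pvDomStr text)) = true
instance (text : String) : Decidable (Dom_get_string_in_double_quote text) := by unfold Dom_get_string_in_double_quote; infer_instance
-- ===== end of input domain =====

-- B replaces A's per-character toggle scan by one split('"') followed by a pairwise walk
-- over the parts (objective: faster — split does the scanning at C level in Python).

-- ===== PORT A =====
-- one iteration of A's for-loop: state (lists, double_quote, var); var[1:] is PySem.List.slice
def pvAStep (st : List String × Bool × List Char) (arr : Char) : List String × Bool × List Char :=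
  let dq := if arr = '"' then !st.2.1 else st.2.1
  if dq then (st.1, dq, st.2.2 ++ [arr])
  else if st.2.2.length ≠ 0 then
    (st.1 ++ [String.ofList (PySem.List.slice st.2.2 (some 1) none)], dq, [])
  else (st.1, dq, st.2.2)

def get_string_in_double_quote (text : String) : List String :=
  (text.toList.foldl pvAStep ([], false, [])).1

-- ===== PORT B =====
-- the for-over-iterator loop of Source B: consume two parts per step, keep the first of each
-- pair, stop when no part follows (unterminated quote); str.split('"') = List.splitOn '"'
def pvBGo (out : List String) (parts : List (List Char)) : List String :=
  match parts with
  | [] => out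
  | content :: rest =>
    match rest with
    | [] => out
    | _ :: rest' => pvBGo (out ++ [String.ofList content]) rest'

def get_string_in_double_quote_alt (text : String) : List String :=
  pvBGo [] ((List.splitOn '"' text.toList).drop 1)

-- ===== PRECONDITION & SPEC =====
def Spec_get_string_in_double_quote (text : String) (out : List String) : Prop := out = get_string_in_double_quote_alt text
instance (text : String) (out : List String) : Decidable (Spec_get_string_in_double_quote text out) := by unfold Spec_get_string_in_double_quote; infer_instance

-- ===== CLAIM (what is proved, stated in full; the proofs are below) =====
def Claim_equal_get_string_in_double_quote : Prop := ∀ (text : String), Dom_get_string_in_double_quote text → Spec_get_string_in_double_quote text (get_string_in_double_quote text)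

-- ===== LEMMAS AND PROOFS =====

-- the accumulator of pvBGo factors out
theorem pvBGo_acc_aux (n : Nat) : ∀ (parts : List (List Char)), parts.length ≤ n →
    ∀ out, pvBGo out parts = out ++ pvBGo [] parts := by
  induction n with
  | zero =>
    intro parts h out
    cases parts with
    | nil => simp [pvBGo]
    | cons c rest => simp at h
  | succ n ih =>
    intro parts h out
    cases parts with
    | nil => simp [pvBGo]
    | cons c rest =>
      cases rest with
      | nil => simp [pvBGo]
      | cons d rest' =>
        have h' : rest'.length ≤ n := by simp at h; omega
        simp only [pvBGo]
        rw [ih rest' h' (out ++ [String.ofList c]), ih rest' h' ([] ++ [String.ofList c])]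
        simp

theorem pvBGo_acc (out : List String) (parts : List (List Char)) :
    pvBGo out parts = out ++ pvBGo [] parts :=
  pvBGo_acc_aux parts.length parts le_rfl out

-- main invariant, both loop states of A at once:
--  * out of quotes (var = []): A's remaining output is B's pairwise walk of the split tail;
--  * inside quotes (var = '"' :: v): v is prepended to the first split piece of the rest.
theorem pvMain (cs : List Char) :
    (∀ lists, (List.foldl pvAStep (lists, false, ([] : List Char)) cs).1
        = lists ++ pvBGo [] ((List.splitOn '"' cs).drop 1))
    ∧ (∀ lists v, (List.foldl pvAStep (lists, true, '"' :: v) cs).1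
        = lists ++ pvBGo [] ((List.splitOn '"' cs).modifyHead (v ++ ·))) := by
  induction cs with
  | nil =>
    constructor
    · intro lists; simp [List.splitOn, List.splitOnP_nil, pvBGo]
    · intro lists v; simp [List.splitOn, List.splitOnP_nil, pvBGo]
  | cons c cs ih =>
    constructor
    · intro lists
      by_cases hc : c = '"'
      · subst hc
        rw [List.foldl_cons]
        have hstep : pvAStep (lists, false, ([] : List Char)) '"' = (lists, true, ['"']) := by
          simp [pvAStep]
        rw [hstep]
        have := (ih.2) lists []
        rw [this]
        have hsp : List.splitOn '"' ('"' :: cs) = [] :: List.splitOn '"' cs := by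
          simp [List.splitOn, List.splitOnP_cons]
        rw [hsp]
        obtain ⟨h, t, hht⟩ := List.exists_cons_of_ne_nil (List.splitOnP_ne_nil (· == '"') cs)
        simp only [List.splitOn] at hht ⊢
        rw [hht]
        simp
      · rw [List.foldl_cons]
        have hstep : pvAStep (lists, false, ([] : List Char)) c = (lists, false, []) := by
          simp [pvAStep, hc]
        rw [hstep, ih.1 lists]
        have hsp : List.splitOn '"' (c :: cs)
            = List.modifyHead (List.cons c) (List.splitOn '"' cs) := by
          simp [List.splitOn, List.splitOnP_cons, hc]
        rw [hsp]
        obtain ⟨h, t, hht⟩ := List.exists_cons_of_ne_nil (List.splitOnP_ne_nil (· == '"') cs)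
        simp only [List.splitOn] at hht ⊢
        rw [hht]
        simp
    · intro lists v
      by_cases hc : c = '"'
      · subst hc
        rw [List.foldl_cons]
        have hstep : pvAStep (lists, true, '"' :: v) '"'
            = (lists ++ [String.ofList v], false, []) := by
          simp [pvAStep, PySem.List.slice_from_one]
        rw [hstep, ih.1 (lists ++ [String.ofList v])]
        have hsp : List.splitOn '"' ('"' :: cs) = [] :: List.splitOn '"' cs := by
          simp [List.splitOn, List.splitOnP_cons]
        rw [hsp]
        obtain ⟨h, t, hht⟩ := List.exists_cons_of_ne_nil (List.splitOnP_ne_nil (· == '"') cs)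
        simp only [List.splitOn] at hht ⊢
        rw [hht]
        simp [pvBGo, pvBGo_acc [String.ofList v]]
      · rw [List.foldl_cons]
        have hstep : pvAStep (lists, true, '"' :: v) c = (lists, true, '"' :: (v ++ [c])) := by
          simp [pvAStep, hc]
        rw [hstep, ih.2 lists (v ++ [c])]
        have hsp : List.splitOn '"' (c :: cs)
            = List.modifyHead (List.cons c) (List.splitOn '"' cs) := by
          simp [List.splitOn, List.splitOnP_cons, hc]
        rw [hsp]
        obtain ⟨h, t, hht⟩ := List.exists_cons_of_ne_nil (List.splitOnP_ne_nil (· == '"') cs)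
        simp only [List.splitOn] at hht ⊢
        rw [hht]
        simp

-- ===== VERDICT (by name: the statement is the Claim_ definition above) =====
theorem get_string_in_double_quote_spec : Claim_equal_get_string_in_double_quote := by
  intro text _
  unfold Spec_get_string_in_double_quote get_string_in_double_quote get_string_in_double_quote_alt
  have h := (pvMain text.toList).1 []
  simpa using h
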